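-- pv_equiv track=rewrite | github.com/NGMLGroup/bibtex-fixer | check_and_fix_biblio.py | remove_arxiv_fields
-- ===== SOURCE A (Python) =====
-- def remove_arxiv_fields(fields):
--     cleaned = dict(fields)
--     for field in ("eprint", "archiveprefix", "primaryclass"):
--         cleaned.pop(field, None)
--     for field in ("journal", "url", "note"):
--         value = cleaned.get(field)
--         if value and "arxiv" in value.lower():
--             cleaned.pop(field, None)
--     return cleaned
-- ===== SOURCE B (Python) =====
-- def remove_arxiv_fields(fields):
--     always_drop = ("eprint", "archiveprefix", "primaryclass")
--     arxiv_prone = ("journal", "url", "note")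
--     return {
--         key: value
--         for key, value in dict(fields).items()
--         if not (key in always_drop
--                 or (key in arxiv_prone and value and "arxiv" in value.lower()))
--     }
-- ===== Notes on version B (the rewrite author's own statement) =====
-- stated objective: simpler
-- what changed: A copies the dict and runs two pop loops (one unconditional, one with a get-and-test); B decides each entry once, as a single filtering dict comprehension over the entry's own items with the removal test inlined.
import Mathlib
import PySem

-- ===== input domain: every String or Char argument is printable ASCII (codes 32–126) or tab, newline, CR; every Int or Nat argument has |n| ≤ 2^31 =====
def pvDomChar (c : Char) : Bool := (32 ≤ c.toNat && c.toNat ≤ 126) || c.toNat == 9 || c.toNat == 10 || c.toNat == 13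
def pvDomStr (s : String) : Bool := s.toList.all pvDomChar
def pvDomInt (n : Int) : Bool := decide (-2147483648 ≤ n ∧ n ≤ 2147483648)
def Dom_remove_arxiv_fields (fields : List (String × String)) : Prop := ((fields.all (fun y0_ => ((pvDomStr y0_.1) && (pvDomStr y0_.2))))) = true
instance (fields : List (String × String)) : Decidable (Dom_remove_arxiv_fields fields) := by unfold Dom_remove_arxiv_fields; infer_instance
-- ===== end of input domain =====

-- B replaces A's copy-then-two-pop-loops by one filtering pass over the dict's items (simpler); return value only, A mutates nothing caller-visible.

-- ===== PORT A =====
def remove_arxiv_fields (fields : List (String × String)) : List (String × String) :=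
  -- cleaned = dict(fields)
  let cleaned := PySem.Dict.ofList fields
  -- for field in ("eprint", "archiveprefix", "primaryclass"): cleaned.pop(field, None)  (value discarded)
  let cleaned := ["eprint", "archiveprefix", "primaryclass"].foldl
    (fun d field => d.erase field) cleaned
  -- for field in ("journal", "url", "note"): value = cleaned.get(field);
  --   if value and "arxiv" in value.lower(): cleaned.pop(field, None)
  let cleaned := ["journal", "url", "note"].foldl
    (fun d field =>
      match d.get? field with
      | some value =>
          if value != "" && PySem.Str.isIn "arxiv" (PySem.Str.lower value) then d.erase field
          else d
      | none => d) cleaned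
  cleaned.items

-- ===== PORT B =====
def pvAlwaysDrop : List String := ["eprint", "archiveprefix", "primaryclass"]
def pvArxivProne : List String := ["journal", "url", "note"]
def pvDrop (key value : String) : Bool :=
  pvAlwaysDrop.contains key ||
    (pvArxivProne.contains key && value != "" && PySem.Str.isIn "arxiv" (PySem.Str.lower value))

def remove_arxiv_fields_alt (fields : List (String × String)) : List (String × String) :=
  (PySem.Dict.ofList fields).items.filter (fun p => !pvDrop p.1 p.2)

-- ===== PRECONDITION & SPEC =====
def Spec_remove_arxiv_fields (fields : List (String × String)) (out : List (String × String)) : Prop := out = remove_arxiv_fields_alt fields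
instance (fields : List (String × String)) (out : List (String × String)) : Decidable (Spec_remove_arxiv_fields fields out) := by unfold Spec_remove_arxiv_fields; infer_instance

-- ===== CLAIM (what is proved, stated in full; the proofs are below) =====
def Claim_equal_remove_arxiv_fields : Prop := ∀ (fields : List (String × String)), Dom_remove_arxiv_fields fields → Spec_remove_arxiv_fields fields (remove_arxiv_fields fields)

-- ===== LEMMAS AND PROOFS =====

-- map-fst nodup survives filtering
theorem pv_nodup_filter (l : List (String × String)) (q : String × String → Bool)
    (h : (l.map (fun p => p.1)).Nodup) : ((l.filter q).map (fun p => p.1)).Nodup :=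
  h.sublist ((l.filter_sublist (p := q)).map (fun p => p.1))

theorem pv_nodup_erase (d : PySem.Dict String String) (f : String)
    (h : (d.items.map (fun p => p.1)).Nodup) :
    ((d.erase f).items.map (fun p => p.1)).Nodup := by
  simpa [PySem.Dict.erase] using pv_nodup_filter d.items _ h

-- one iteration of A's conditional pop loop, as a filter of the items
theorem pv_step_eq (d : PySem.Dict String String) (f : String)
    (hnd : (d.items.map (fun p => p.1)).Nodup) :
    (match d.get? f with
      | some value =>
          if value != "" && PySem.Str.isIn "arxiv" (PySem.Str.lower value) then d.erase f
          else d
      | none => d)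
    = PySem.Dict.mk (d.items.filter
        (fun p => !(p.1 == f && (p.2 != "" && PySem.Str.isIn "arxiv" (PySem.Str.lower p.2))))) := by
  apply PySem.Dict.ext
  show (match d.get? f with
      | some value =>
          if value != "" && PySem.Str.isIn "arxiv" (PySem.Str.lower value) then d.erase f
          else d
      | none => d).items = _
  cases hg : d.get? f with
  | none =>
    have hfind : d.items.find? (fun p => p.1 == f) = none := by
      simpa [PySem.Dict.get?] using hg
    have hforall : ∀ p ∈ d.items, ¬ ((fun p => p.1 == f) p = true) :=
      fun p hp => List.find?_eq_none.mp hfind p hp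
    simp only
    refine (List.filter_eq_self.mpr ?_).symm
    intro p hp
    have h1 : (p.1 == f) = false := by
      have := hforall p hp; simp at this; simp [this]
    simp [h1]
  | some v =>
    obtain ⟨q, hq, hqv⟩ : ∃ q, d.items.find? (fun p => p.1 == f) = some q ∧ q.2 = v := by
      simp only [PySem.Dict.get?, Option.map_eq_some_iff] at hg
      obtain ⟨q, h1, h2⟩ := hg
      exact ⟨q, h1, h2⟩
    have hqmem : q ∈ d.items := List.mem_of_find?_eq_some hq
    have hqf : q.1 = f := by
      have := List.find?_some hq; simpa using this
    have huniq : ∀ p ∈ d.items, p.1 = f → p = q := by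
      intro p hp hpf
      exact List.inj_on_of_nodup_map hnd hp hqmem (by show p.1 = q.1; rw [hpf, hqf])
    by_cases hc : (v != "" && PySem.Str.isIn "arxiv" (PySem.Str.lower v)) = true
    · simp only
      rw [if_pos hc]
      simp only [PySem.Dict.erase]
      refine List.filter_congr ?_
      intro p hp
      by_cases h1 : p.1 = f
      · have h2 : p.2 = v := by rw [huniq p hp h1, hqv]
        rw [h1, h2, hc]
        simp
      · simp [h1]
    · have hc' : (v != "" && PySem.Str.isIn "arxiv" (PySem.Str.lower v)) = false :=
        Bool.eq_false_iff.mpr hc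
      simp only
      rw [if_neg hc]
      refine (List.filter_eq_self.mpr ?_).symm
      intro p hp
      by_cases h1 : p.1 = f
      · have h2 : p.2 = v := by rw [huniq p hp h1, hqv]
        rw [h1, h2, hc']
        simp
      · simp [h1]

-- the pointwise boolean identity between A's chained tests and B's single test
theorem pv_bool : ∀ (a1 a2 a3 a4 a5 a6 b i : Bool),
    (!(a6 && (b && i)) && (!(a5 && (b && i)) && (!(a4 && (b && i)) &&
      (!a3 && (!a2 && !a1)))))
    = !((a1 || (a2 || a3)) || (((a4 || (a5 || a6)) && b) && i)) := by
  decide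

-- ===== VERDICT (by name: the statement is the Claim_ definition above) =====
theorem remove_arxiv_fields_spec : Claim_equal_remove_arxiv_fields := by
  intro fields _
  unfold Spec_remove_arxiv_fields remove_arxiv_fields remove_arxiv_fields_alt
  simp only [List.foldl]
  have hnd0 : ((PySem.Dict.ofList fields).items.map (fun p => p.1)).Nodup := by
    simpa [PySem.Dict.keys] using
      PySem.Dict.nodup_keys_ofList (κ := String) (ν := String) fields
  have hnd3 : (((((PySem.Dict.ofList fields).erase "eprint").erase "archiveprefix").erase
      "primaryclass").items.map (fun p => p.1)).Nodup :=
    pv_nodup_erase _ _ (pv_nodup_erase _ _ (pv_nodup_erase _ _ hnd0))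
  rw [pv_step_eq _ "journal" hnd3]
  rw [pv_step_eq _ "url" (pv_nodup_filter _ _ hnd3)]
  rw [pv_step_eq _ "note" (pv_nodup_filter _ _ (pv_nodup_filter _ _ hnd3))]
  simp only [PySem.Dict.erase, List.filter_filter]
  refine List.filter_congr ?_
  intro p _
  simp only [pvDrop, pvAlwaysDrop, pvArxivProne, List.contains_cons, List.contains_nil,
    Bool.or_false]
  exact pv_bool (p.1 == "eprint") (p.1 == "archiveprefix") (p.1 == "primaryclass")
    (p.1 == "journal") (p.1 == "url") (p.1 == "note") (p.2 != "")
    (PySem.Str.isIn "arxiv" (PySem.Str.lower p.2))
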